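-- pv_equiv track=rewrite | github.com/huajianv587/safety_helmet_yolo26 | src/helmet_monitoring/storage/repository.py | _bucket_summary
-- ===== SOURCE A (Python) =====
-- from typing import Any, Iterable
--
-- CLOSED_STATUSES = {"remediated", "ignored", "false_positive", "confirmed"}
--
-- REVIEW_REQUIRED_IDENTITY_STATUSES = {"review_required", "unresolved"}
--
-- def _bucket_summary(alerts: list[dict[str, Any]]) -> dict[str, Any]:
--     return {
--         "total": len(alerts),
--         "pending": sum(1 for item in alerts if item.get("status") == "pending"),
--         "assigned": sum(1 for item in alerts if item.get("status") == "assigned"),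
--         "review_required": sum(1 for item in alerts if item.get("identity_status") in REVIEW_REQUIRED_IDENTITY_STATUSES),
--         "resolved_identity": sum(1 for item in alerts if item.get("identity_status") == "resolved"),
--         "remediated": sum(1 for item in alerts if item.get("status") == "remediated"),
--         "false_positive": sum(1 for item in alerts if item.get("status") == "false_positive"),
--         "closed": sum(1 for item in alerts if item.get("status") in CLOSED_STATUSES),
--     }
-- ===== SOURCE B (Python) =====
-- from collections import Counter
--
-- CLOSED_STATUSES = {"remediated", "ignored", "false_positive", "confirmed"}
--
-- REVIEW_REQUIRED_IDENTITY_STATUSES = {"review_required", "unresolved"}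
--
-- def _bucket_summary(alerts):
--     status_counts = Counter(item.get("status") for item in alerts)
--     identity_counts = Counter(item.get("identity_status") for item in alerts)
--     return {
--         "total": len(alerts),
--         "pending": status_counts["pending"],
--         "assigned": status_counts["assigned"],
--         "review_required": sum(identity_counts[s] for s in REVIEW_REQUIRED_IDENTITY_STATUSES),
--         "resolved_identity": identity_counts["resolved"],
--         "remediated": status_counts["remediated"],
--         "false_positive": status_counts["false_positive"],
--         "closed": sum(status_counts[s] for s in CLOSED_STATUSES),
--     }
-- ===== Notes on version B (the rewrite author's own statement) =====
-- stated objective: idiomatic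
-- what changed: Replaces eight separate full scans of alerts with two Counter tabulation passes (one over status, one over identity_status) and assembles the summary from constant-time table reads.
import Mathlib
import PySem

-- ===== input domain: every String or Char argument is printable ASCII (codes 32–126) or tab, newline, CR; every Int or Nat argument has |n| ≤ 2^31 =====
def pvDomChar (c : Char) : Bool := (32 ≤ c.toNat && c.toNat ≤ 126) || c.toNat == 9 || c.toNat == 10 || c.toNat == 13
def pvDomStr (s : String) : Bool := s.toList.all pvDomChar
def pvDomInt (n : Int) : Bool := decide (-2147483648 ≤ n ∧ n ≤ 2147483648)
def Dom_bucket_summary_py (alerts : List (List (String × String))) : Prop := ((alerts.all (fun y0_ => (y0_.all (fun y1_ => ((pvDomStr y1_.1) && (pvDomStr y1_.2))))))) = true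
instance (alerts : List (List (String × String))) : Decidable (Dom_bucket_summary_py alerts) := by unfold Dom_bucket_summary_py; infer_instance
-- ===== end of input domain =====

-- B replaces A's eight full scans of `alerts` by two Counter tabulation passes plus table reads (idiomatic).

-- ===== PORT A =====
-- item.get(k) on the dict `item`
def pvItemGet (item : List (String × String)) (k : String) : Option String :=
  (PySem.Dict.mk item).get? k

-- sum(1 for item in alerts if cond(item))
def pvSumIf (alerts : List (List (String × String))) (cond : List (String × String) → Bool) : Int :=
  alerts.foldl (fun acc item => if cond item then acc + 1 else acc) 0

def bucket_summary_py (alerts : List (List (String × String))) : List (String × Int) :=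
  [("total", (alerts.length : Int)),
   ("pending", pvSumIf alerts (fun item => pvItemGet item "status" == some "pending")),
   ("assigned", pvSumIf alerts (fun item => pvItemGet item "status" == some "assigned")),
   ("review_required", pvSumIf alerts (fun item =>
      pvItemGet item "identity_status" == some "review_required" ||
      pvItemGet item "identity_status" == some "unresolved")),
   ("resolved_identity", pvSumIf alerts (fun item => pvItemGet item "identity_status" == some "resolved")),
   ("remediated", pvSumIf alerts (fun item => pvItemGet item "status" == some "remediated")),
   ("false_positive", pvSumIf alerts (fun item => pvItemGet item "status" == some "false_positive")),
   ("closed", pvSumIf alerts (fun item =>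
      pvItemGet item "status" == some "remediated" ||
      pvItemGet item "status" == some "ignored" ||
      pvItemGet item "status" == some "false_positive" ||
      pvItemGet item "status" == some "confirmed"))]

-- ===== PORT B =====
def bucket_summary_py_alt (alerts : List (List (String × String))) : List (String × Int) :=
  let statusCounts := PySem.Dict.counter (alerts.map (fun item => pvItemGet item "status"))
  let identityCounts := PySem.Dict.counter (alerts.map (fun item => pvItemGet item "identity_status"))
  [("total", (alerts.length : Int)),
   ("pending", statusCounts.getD (some "pending") 0),
   ("assigned", statusCounts.getD (some "assigned") 0),
   ("review_required", identityCounts.getD (some "review_required") 0 + identityCounts.getD (some "unresolved") 0),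
   ("resolved_identity", identityCounts.getD (some "resolved") 0),
   ("remediated", statusCounts.getD (some "remediated") 0),
   ("false_positive", statusCounts.getD (some "false_positive") 0),
   ("closed", statusCounts.getD (some "remediated") 0 + statusCounts.getD (some "ignored") 0 +
              statusCounts.getD (some "false_positive") 0 + statusCounts.getD (some "confirmed") 0)]

-- ===== PRECONDITION & SPEC =====
def Spec_bucket_summary_py (alerts : List (List (String × String))) (out : List (String × Int)) : Prop := out = bucket_summary_py_alt alerts
instance (alerts : List (List (String × String))) (out : List (String × Int)) : Decidable (Spec_bucket_summary_py alerts out) := by unfold Spec_bucket_summary_py; infer_instance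

-- ===== CLAIM (what is proved, stated in full; the proofs are below) =====
def Claim_equal_bucket_summary_py : Prop := ∀ (alerts : List (List (String × String))), Dom_bucket_summary_py alerts → Spec_bucket_summary_py alerts (bucket_summary_py alerts)

-- ===== LEMMAS AND PROOFS =====

-- B's counter lookup equals A's single scan for one target value
theorem getD_counter_eq_pvSumIf (alerts : List (List (String × String)))
    (k : String) (v : String) :
    (PySem.Dict.counter (alerts.map (fun item => pvItemGet item k))).getD (some v) 0 =
      pvSumIf alerts (fun item => pvItemGet item k == some v) := by
  rw [PySem.Dict.getD_counter]
  unfold pvSumIf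
  rw [PySem.List.foldl_count_if]
  simp [List.count_eq_countP, List.countP_map, Function.comp_def]

-- counting a disjunction equals the sum of the counts when the disjuncts are exclusive
theorem countP_or_disjoint {α : Type} (p q : α → Bool)
    (h : ∀ a, p a = true → q a = false) (l : List α) :
    l.countP (fun a => p a || q a) = l.countP p + l.countP q := by
  induction l with
  | nil => simp
  | cons x xs ih =>
    by_cases hp : p x = true
    · simp [hp, h x hp, ih]; omega
    · simp only [Bool.not_eq_true] at hp
      by_cases hq : q x = true <;> simp [hp, hq, ih]
      omega

theorem pvSumIf_or (alerts : List (List (String × String)))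
    (p q : List (String × String) → Bool)
    (h : ∀ a, p a = true → q a = false) :
    pvSumIf alerts (fun item => p item || q item) = pvSumIf alerts p + pvSumIf alerts q := by
  unfold pvSumIf
  rw [PySem.List.foldl_count_if, PySem.List.foldl_count_if, PySem.List.foldl_count_if,
      countP_or_disjoint p q h]
  push_cast; ring

-- ===== VERDICT (by name: the statement is the Claim_ definition above) =====
theorem bucket_summary_py_spec : Claim_equal_bucket_summary_py := by
  intro alerts _
  unfold Spec_bucket_summary_py bucket_summary_py bucket_summary_py_alt
  simp only [getD_counter_eq_pvSumIf]
  have hdisj : ∀ (k : String) (v w : String), v ≠ w →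
      ∀ a : List (String × String), (pvItemGet a k == some v) = true →
        (pvItemGet a k == some w) = false := by
    intro k v w hvw a ha
    simp only [beq_iff_eq] at ha ⊢
    simp [ha, hvw]
  have hrr :
      pvSumIf alerts (fun item =>
        pvItemGet item "identity_status" == some "review_required" ||
        pvItemGet item "identity_status" == some "unresolved")
      = pvSumIf alerts (fun item => pvItemGet item "identity_status" == some "review_required")
        + pvSumIf alerts (fun item => pvItemGet item "identity_status" == some "unresolved") :=
    pvSumIf_or _ _ _ (hdisj "identity_status" _ _ (by decide))
  have hcl :
      pvSumIf alerts (fun item =>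
        pvItemGet item "status" == some "remediated" ||
        pvItemGet item "status" == some "ignored" ||
        pvItemGet item "status" == some "false_positive" ||
        pvItemGet item "status" == some "confirmed")
      = pvSumIf alerts (fun item => pvItemGet item "status" == some "remediated")
        + pvSumIf alerts (fun item => pvItemGet item "status" == some "ignored")
        + pvSumIf alerts (fun item => pvItemGet item "status" == some "false_positive")
        + pvSumIf alerts (fun item => pvItemGet item "status" == some "confirmed") := by
    rw [pvSumIf_or _ _ _ (by
      intro a ha
      rcases Bool.or_eq_true_iff.mp ha with h | h
      · rcases Bool.or_eq_true_iff.mp h with h' | h'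
        · exact hdisj "status" _ _ (by decide) a h'
        · exact hdisj "status" _ _ (by decide) a h'
      · exact hdisj "status" _ _ (by decide) a h)]
    rw [pvSumIf_or _ _ _ (by
      intro a ha
      rcases Bool.or_eq_true_iff.mp ha with h | h
      · exact hdisj "status" _ _ (by decide) a h
      · exact hdisj "status" _ _ (by decide) a h)]
    rw [pvSumIf_or _ _ _ (hdisj "status" _ _ (by decide))]
  rw [hrr, hcl]
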